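-- pv_equiv track=rewrite | github.com/tensorflow/tensorflow | tensorflow_text/tensorflow_text/tools/wordpiece_vocab/wordpiece_tokenizer_learner_lib.py | get_split_indices
-- ===== SOURCE A (Python) =====
-- def get_split_indices(word, curr_tokens, include_joiner_token, joiner):
--   """Gets indices for valid substrings of word, for iterations > 0.
--
--   For iterations > 0, rather than considering every possible substring, we only
--   want to consider starting points corresponding to the start of wordpieces in
--   the current vocabulary.
--
--   Args:
--     word: string we want to split into substrings
--     curr_tokens: string to int dict of tokens in vocab (from previous iteration)
--     include_joiner_token: bool whether to include joiner token
--     joiner: string used to indicate suffixes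
--
--   Returns:
--     list of ints containing valid starting indices for word
--   """
--
--   indices = []
--   start = 0
--   while start < len(word):
--     end = len(word)
--     while end > start:
--       subtoken = word[start:end]
--       # Subtoken includes the joiner token.
--       if include_joiner_token and start > 0:
--         subtoken = joiner + subtoken
--       # If subtoken is part of vocab, 'end' is a valid start index.
--       if subtoken in curr_tokens:
--         indices.append(end)
--         break
--       end -= 1
--
--     if end == start:
--       return None
--     start = end
--
--   return indices
-- ===== SOURCE B (Python) =====
-- def get_split_indices(word, curr_tokens, include_joiner_token, joiner):
--   """Trie-style re-implementation: build the set of all prefixes of vocab tokens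
--   once, then for each start walk forward through the word, pruning as soon as
--   the current (joiner-prefixed) substring is no longer a prefix of any token,
--   while remembering the deepest position that is itself a token."""
--   tokens = set(curr_tokens)
--   prefixes = set()
--   for t in curr_tokens:
--     for k in range(len(t) + 1):
--       prefixes.add(t[:k])
--
--   indices = []
--   n = len(word)
--   start = 0
--   while start < n:
--     cur = joiner if (include_joiner_token and start > 0) else ""
--     best = None
--     pos = start
--     while pos < n:
--       cur = cur + word[pos]
--       if cur not in prefixes:
--         break
--       pos += 1
--       if cur in tokens:
--         best = pos
--     if best is None:
--       return None
--     indices.append(best)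
--     start = best
--   return indices
-- ===== Notes on version B (the rewrite author's own statement) =====
-- stated objective: alternative
-- what changed: A scans each start position backward over all substring lengths testing dict membership; B builds the set of all prefixes of the vocab tokens once (an implicit trie) and walks each start forward through the word, pruning as soon as the joiner-prefixed substring is no prefix of any token while remembering the deepest complete token.
import Mathlib
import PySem

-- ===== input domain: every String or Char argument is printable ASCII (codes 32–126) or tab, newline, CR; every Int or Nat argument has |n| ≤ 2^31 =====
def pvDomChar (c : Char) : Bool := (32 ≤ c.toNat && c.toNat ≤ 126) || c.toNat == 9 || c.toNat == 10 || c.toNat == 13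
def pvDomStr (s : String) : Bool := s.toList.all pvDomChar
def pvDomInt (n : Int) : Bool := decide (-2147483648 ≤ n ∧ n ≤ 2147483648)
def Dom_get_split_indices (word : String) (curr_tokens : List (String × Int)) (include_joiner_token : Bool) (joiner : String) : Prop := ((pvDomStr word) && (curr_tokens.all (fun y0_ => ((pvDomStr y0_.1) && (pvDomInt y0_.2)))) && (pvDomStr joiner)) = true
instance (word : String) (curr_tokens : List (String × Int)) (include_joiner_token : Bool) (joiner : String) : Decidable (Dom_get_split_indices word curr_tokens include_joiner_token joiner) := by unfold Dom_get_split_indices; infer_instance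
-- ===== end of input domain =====

-- B replaces A's per-start backward scan over all substring lengths by an implicit trie
-- (the set of all prefixes of vocab tokens, built once) walked forward with pruning;
-- objective: alternative algorithm, same return value everywhere.

-- ===== PORT A =====
-- `subtoken in curr_tokens` — membership among the dict's keys (strings as char lists)
def pvMem (ct : List (String × Int)) (sub : List Char) : Bool :=
  ct.any (fun p => p.1.toList == sub)

-- subtoken = word[start:end], joiner-prefixed when include_joiner_token and start > 0
def pvSub (w j : List Char) (inc : Bool) (start e : Nat) : List Char :=
  let sub := PySem.List.slice w (some (start : Int)) (some (e : Int))
  if inc && decide (0 < start) then j ++ sub else sub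

-- A's inner `while end > start` loop: scan end downward, stop at the first hit
def pvAFind (w : List Char) (ct : List (String × Int)) (inc : Bool) (j : List Char)
    (start : Nat) : Nat → Option Nat
  | 0 => none
  | e + 1 =>
    if start < e + 1 then
      if pvMem ct (pvSub w j inc start (e + 1)) then some (e + 1)
      else pvAFind w ct inc j start e
    else none

-- A's outer `while start < len(word)` loop (fuel = a step counter; len(word)+1 steps
-- always suffice, since start strictly increases each iteration)
def pvAOuter (w : List Char) (ct : List (String × Int)) (inc : Bool) (j : List Char) :
    Nat → Nat → List Int → Option (List Int)
  | 0, _, _ => none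
  | fuel + 1, start, acc =>
    if start < w.length then
      match pvAFind w ct inc j start w.length with
      | some e => pvAOuter w ct inc j fuel e (acc ++ [(e : Int)])
      | none => none
    else some acc

def get_split_indices (word : String) (curr_tokens : List (String × Int))
    (include_joiner_token : Bool) (joiner : String) : Option (List Int) :=
  pvAOuter word.toList curr_tokens include_joiner_token joiner.toList
    (word.toList.length + 1) 0 []

-- ===== PORT B =====
-- tokens = set(curr_tokens)  (the dict's keys as a set)
def pvTokens (ct : List (String × Int)) : PySem.Set (List Char) :=
  PySem.Set.ofList (ct.map (fun p => p.1.toList))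

-- prefixes = { t[:k] | t in curr_tokens, 0 ≤ k ≤ len(t) }  (the implicit trie)
def pvPrefixes (ct : List (String × Int)) : PySem.Set (List Char) :=
  ct.foldl (fun s p =>
    (PySem.List.pyRange 0 ((p.1.toList.length : Int) + 1) 1).foldl
      (fun s k => PySem.Set.add s (PySem.List.slice p.1.toList none (some k))) s)
    PySem.Set.empty

-- B's inner `while pos < n` loop: extend cur forward, prune when it is no prefix,
-- remember the deepest position where cur is itself a token (fuel = n - pos suffices)
def pvBInner (w : List Char) (pres toks : PySem.Set (List Char)) :
    Nat → List Char → Nat → Option Nat → Option Nat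
  | 0, _, _, best => best
  | fuel + 1, cur, pos, best =>
    if h : pos < w.length then
      if PySem.Set.contains pres (cur ++ [w[pos]]) then
        pvBInner w pres toks fuel (cur ++ [w[pos]]) (pos + 1)
          (if PySem.Set.contains toks (cur ++ [w[pos]]) then some (pos + 1) else best)
      else best
    else best

-- B's outer `while start < n` loop (same fuel discipline as A's outer loop)
def pvBOuter (w : List Char) (pres toks : PySem.Set (List Char)) (inc : Bool) (j : List Char) :
    Nat → Nat → List Int → Option (List Int)
  | 0, _, _ => none
  | fuel + 1, start, acc =>
    if start < w.length then
      match pvBInner w pres toks (w.length - start)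
          (if inc && decide (0 < start) then j else []) start none with
      | some e => pvBOuter w pres toks inc j fuel e (acc ++ [(e : Int)])
      | none => none
    else some acc

def get_split_indices_alt (word : String) (curr_tokens : List (String × Int))
    (include_joiner_token : Bool) (joiner : String) : Option (List Int) :=
  pvBOuter word.toList (pvPrefixes curr_tokens) (pvTokens curr_tokens)
    include_joiner_token joiner.toList (word.toList.length + 1) 0 []

-- ===== PRECONDITION & SPEC =====
def Spec_get_split_indices (word : String) (curr_tokens : List (String × Int)) (include_joiner_token : Bool) (joiner : String) (out : Option (List Int)) : Prop := out = get_split_indices_alt word curr_tokens include_joiner_token joiner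
instance (word : String) (curr_tokens : List (String × Int)) (include_joiner_token : Bool) (joiner : String) (out : Option (List Int)) : Decidable (Spec_get_split_indices word curr_tokens include_joiner_token joiner out) := by unfold Spec_get_split_indices; infer_instance

-- ===== CLAIM (what is proved, stated in full; the proofs are below) =====
def Claim_equal_get_split_indices : Prop := ∀ (word : String) (curr_tokens : List (String × Int)) (include_joiner_token : Bool) (joiner : String), Dom_get_split_indices word curr_tokens include_joiner_token joiner → Spec_get_split_indices word curr_tokens include_joiner_token joiner (get_split_indices word curr_tokens include_joiner_token joiner)

-- ===== LEMMAS AND PROOFS =====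

-- the joiner prefix B starts cur with
def pvCur (inc : Bool) (j : List Char) (start : Nat) : List Char :=
  if inc && decide (0 < start) then j else []

theorem pvSub_eq (w j : List Char) (inc : Bool) (start e : Nat) :
    pvSub w j inc start e = pvCur inc j start ++ (w.drop start).take (e - start) := by
  simp only [pvSub, pvCur, PySem.List.slice_natCast]
  split <;> simp

theorem pvTokens_contains (ct : List (String × Int)) (s : List Char) :
    PySem.Set.contains (pvTokens ct) s = pvMem ct s := by
  rw [Bool.eq_iff_iff, PySem.Set.contains_iff, pvTokens, pvMem, List.any_eq_true]
  rw [PySem.Set.mem_ofList, List.mem_map]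
  simp

theorem mem_pvPrefixes (ct : List (String × Int)) (s : List Char) :
    s ∈ pvPrefixes ct ↔ ∃ p ∈ ct, s <+: p.1.toList := by
  have step : ∀ (t : List Char) (s0 : PySem.Set (List Char)),
      s ∈ (PySem.List.pyRange 0 ((t.length : Int) + 1) 1).foldl
        (fun s k => PySem.Set.add s (PySem.List.slice t none (some k))) s0 ↔
      s ∈ s0 ∨ s <+: t := by
    intro t s0
    rw [PySem.Set.mem_foldl_add]
    constructor
    · rintro (h | ⟨k, hk, rfl⟩)
      · exact Or.inl h
      · right
        rw [PySem.List.mem_pyRange_one] at hk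
        rw [PySem.List.slice_to _ hk.1]
        exact List.take_prefix _ _
    · rintro (h | h)
      · exact Or.inl h
      · right
        refine ⟨(s.length : Int), ?_, ?_⟩
        · rw [PySem.List.mem_pyRange_one]
          have := h.length_le
          omega
        · rw [PySem.List.slice_to _ (by omega)]
          simpa using (List.prefix_iff_eq_take.mp h)
  suffices H : ∀ s0 : PySem.Set (List Char),
      s ∈ ct.foldl (fun s p =>
        (PySem.List.pyRange 0 ((p.1.toList.length : Int) + 1) 1).foldl
          (fun s k => PySem.Set.add s (PySem.List.slice p.1.toList none (some k))) s) s0 ↔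
      s ∈ s0 ∨ ∃ p ∈ ct, s <+: p.1.toList by
    rw [pvPrefixes, H]
    simp [PySem.Set.empty]
  induction ct with
  | nil => simp
  | cons p ct ih =>
    intro s0
    simp only [List.foldl_cons, ih, step]
    constructor
    · rintro (( h | h) | ⟨q, hq, hpre⟩)
      · exact Or.inl h
      · exact Or.inr ⟨p, List.mem_cons_self, h⟩
      · exact Or.inr ⟨q, List.mem_cons_of_mem _ hq, hpre⟩
    · rintro (h | ⟨q, hq, hpre⟩)
      · exact Or.inl (Or.inl h)
      · rcases List.mem_cons.mp hq with rfl | hq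
        · exact Or.inl (Or.inr hpre)
        · exact Or.inr ⟨q, hq, hpre⟩

-- if cur is no prefix of any token, nothing that extends cur is a token
theorem no_match_of_not_prefix (ct : List (String × Int)) (s x : List Char)
    (hs : PySem.Set.contains (pvPrefixes ct) s = false) (hpre : s <+: x) :
    pvMem ct x = false := by
  by_contra h
  rw [Bool.not_eq_false, pvMem, List.any_eq_true] at h
  obtain ⟨p, hp, he⟩ := h
  rw [beq_iff_eq] at he
  have : s ∈ pvPrefixes ct := (mem_pvPrefixes ct s).mpr ⟨p, hp, he ▸ hpre⟩
  have hc := (PySem.Set.contains_iff (pvPrefixes ct) s).mpr this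
  rw [hs] at hc
  cases hc

-- A's downward scan ignores a top segment with no matches
-- A's downward scan down to a bound at or below start finds nothing
theorem pvAFind_le (w : List Char) (ct : List (String × Int)) (inc : Bool) (j : List Char)
    (start : Nat) : ∀ m, m ≤ start → pvAFind w ct inc j start m = none := by
  intro m
  induction m with
  | zero => intro _; rfl
  | succ m _ =>
    intro h
    simp only [pvAFind]
    rw [if_neg (by omega)]

theorem pvAFind_skip (w : List Char) (ct : List (String × Int)) (inc : Bool) (j : List Char)
    (start m : Nat) : ∀ e, m ≤ e →
    (∀ e', m < e' → e' ≤ e → pvMem ct (pvSub w j inc start e') = false) →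
    pvAFind w ct inc j start e = pvAFind w ct inc j start m := by
  intro e he
  induction e, he using Nat.le_induction with
  | base => intro _; rfl
  | succ e he ih =>
    intro hno
    simp only [pvAFind]
    split
    · rw [hno (e + 1) (by omega) (by omega)]
      simp only [Bool.false_eq_true, if_false]
      exact ih (fun e' h1 h2 => hno e' h1 (by omega))
    · rename_i h
      rw [pvAFind_le w ct inc j start m (by omega)]

-- one step of the substring: word[start:pos+1] = word[start:pos] + word[pos]
theorem take_drop_step (w : List Char) (start pos : Nat) (hsp : start ≤ pos)
    (hp : pos < w.length) :
    (w.drop start).take (pos + 1 - start) = (w.drop start).take (pos - start) ++ [w[pos]] := by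
  have h1 : pos + 1 - start = (pos - start) + 1 := by omega
  rw [h1, List.take_add_one]
  have h2 : (w.drop start)[pos - start]? = some w[pos] := by
    rw [List.getElem?_drop]
    rw [List.getElem?_eq_getElem (by omega)]
    congr 1
    congr 1
    omega
  rw [h2]
  rfl

-- the heart: B's forward pruning walk from pos equals A's full downward scan,
-- provided best already equals A's scan capped at pos
theorem inner_eq (w : List Char) (ct : List (String × Int)) (inc : Bool) (j : List Char)
    (start : Nat) : ∀ fuel pos best, w.length - pos ≤ fuel → start ≤ pos → pos ≤ w.length →
    best = pvAFind w ct inc j start pos →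
    pvBInner w (pvPrefixes ct) (pvTokens ct) fuel
      (pvCur inc j start ++ (w.drop start).take (pos - start)) pos best
      = pvAFind w ct inc j start w.length := by
  intro fuel
  induction fuel with
  | zero =>
    intro pos best hk hsp hpl hbest
    have : pos = w.length := by omega
    simp only [pvBInner]
    rw [hbest, this]
  | succ fuel ih =>
    intro pos best hk hsp hpl hbest
    by_cases hp : pos < w.length
    · simp only [pvBInner]
      rw [dif_pos hp]
      have hcur : (pvCur inc j start ++ (w.drop start).take (pos - start)) ++ [w[pos]]
          = pvCur inc j start ++ (w.drop start).take (pos + 1 - start) := by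
        rw [take_drop_step w start pos hsp hp, List.append_assoc]
      simp only [hcur]
      have hsubeq : pvSub w j inc start (pos + 1)
          = pvCur inc j start ++ (w.drop start).take (pos + 1 - start) := pvSub_eq _ _ _ _ _
      split
      · rename_i hin
        have hbest' : (if PySem.Set.contains (pvTokens ct)
              (pvCur inc j start ++ (w.drop start).take (pos + 1 - start)) then some (pos + 1)
            else best) = pvAFind w ct inc j start (pos + 1) := by
          rw [pvTokens_contains, ← hsubeq]
          conv_rhs => rw [pvAFind]
          rw [if_pos (show start < pos + 1 by omega)]
          by_cases hM : pvMem ct (pvSub w j inc start (pos + 1)) = true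
          · rw [if_pos hM, if_pos hM]
          · rw [if_neg hM, if_neg hM]
            exact hbest
        rw [hbest']
        exact ih (pos + 1) _ (by omega) (by omega) (by omega) rfl
      · rename_i hin
        rw [Bool.not_eq_true] at hin
        have hnone : ∀ e', pos < e' → e' ≤ w.length →
            pvMem ct (pvSub w j inc start e') = false := by
          intro e' h1 h2
          apply no_match_of_not_prefix ct _ _ hin
          rw [pvSub_eq]
          apply (List.prefix_append_right_inj _).mpr
          exact List.take_prefix_take_left (by omega)
        rw [pvAFind_skip w ct inc j start pos w.length hpl hnone, hbest]
    · simp only [pvBInner]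
      rw [dif_neg hp]
      have : pos = w.length := by omega
      rw [hbest, this]

theorem outer_eq (w : List Char) (ct : List (String × Int)) (inc : Bool) (j : List Char) :
    ∀ fuel start acc,
    pvAOuter w ct inc j fuel start acc
      = pvBOuter w (pvPrefixes ct) (pvTokens ct) inc j fuel start acc := by
  intro fuel
  induction fuel with
  | zero => intro start acc; rfl
  | succ fuel ih =>
    intro start acc
    rw [pvAOuter, pvBOuter]
    by_cases hs : start < w.length
    · rw [if_pos hs, if_pos hs]
      have hinner : pvBInner w (pvPrefixes ct) (pvTokens ct) (w.length - start)
          (if inc && decide (0 < start) then j else []) start none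
          = pvAFind w ct inc j start w.length := by
        have h0 : pvCur inc j start ++ (w.drop start).take (start - start)
            = (if inc && decide (0 < start) then j else []) := by
          simp [pvCur]
        rw [← h0]
        exact inner_eq w ct inc j start (w.length - start) start none (le_refl _) (le_refl _)
          (by omega) (pvAFind_le w ct inc j start start (le_refl _)).symm
      rw [hinner]
      rcases pvAFind w ct inc j start w.length with _ | e
      · rfl
      · exact ih e (acc ++ [(e : Int)])
    · rw [if_neg hs, if_neg hs]

-- ===== VERDICT (by name: the statement is the Claim_ definition above) =====
theorem get_split_indices_spec : Claim_equal_get_split_indices := by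
  intro word curr_tokens include_joiner_token joiner _
  unfold Spec_get_split_indices get_split_indices get_split_indices_alt
  exact outer_eq word.toList curr_tokens include_joiner_token joiner.toList
    (word.toList.length + 1) 0 []
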